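-- pv_equiv track=rewrite | github.com/litten8/Projects | School/6th Grade/anagrammer.py | removeFrom
-- ===== SOURCE A (Python) =====
-- import copy
--
-- def removeFrom(d1, d2):
--     d1copy = copy.deepcopy(d1)
--     for k in d2:
--         if k in d1copy:
--             if d2[k] < d1copy[k]:
--                 d1copy[k]-=d2[k]
--             else:
--                 del d1copy[k]
--     return d1copy
-- ===== SOURCE B (Python) =====
-- def removeFrom(d1, d2):
--     # Build the result in one dict comprehension over d1 instead of deep-copying and mutating.
--     return {k: v - d2.get(k, 0) for k, v in d1.items() if k not in d2 or d2[k] < v}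
-- ===== Notes on version B (the rewrite author's own statement) =====
-- stated objective: simpler
-- what changed: B builds the result with a single dict comprehension over d1's items (keep k unless d2 cancels it, value d1[k]-d2.get(k,0)) instead of deep-copying d1 and deleting/mutating entries while iterating over d2.
import Mathlib
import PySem

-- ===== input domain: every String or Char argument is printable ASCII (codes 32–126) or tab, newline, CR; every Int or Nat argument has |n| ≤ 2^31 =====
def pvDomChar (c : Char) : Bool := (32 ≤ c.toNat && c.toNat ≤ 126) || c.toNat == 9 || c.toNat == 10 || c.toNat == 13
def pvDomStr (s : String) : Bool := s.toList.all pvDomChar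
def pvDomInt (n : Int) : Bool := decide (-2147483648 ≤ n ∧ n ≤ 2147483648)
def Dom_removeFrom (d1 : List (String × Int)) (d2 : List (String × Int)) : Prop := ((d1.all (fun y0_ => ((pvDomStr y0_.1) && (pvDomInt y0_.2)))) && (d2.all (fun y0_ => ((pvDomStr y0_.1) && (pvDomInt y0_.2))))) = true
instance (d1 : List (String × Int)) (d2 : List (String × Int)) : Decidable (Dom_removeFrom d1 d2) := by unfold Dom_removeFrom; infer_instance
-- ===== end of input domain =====

-- B replaces A's deepcopy-and-mutate loop over d2 by one dict comprehension over d1 (simpler).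

-- ===== PORT A =====
-- loop body: 'if k in d1copy: if d2[k] < d1copy[k]: d1copy[k] -= d2[k] else: del d1copy[k]'
def removeFromStep (d2 : PySem.Dict String Int) (d1copy : PySem.Dict String Int) (k : String) : PySem.Dict String Int :=
  match PySem.Dict.get? d1copy k with
  | none => d1copy
  | some v1 =>
    if PySem.Dict.getD d2 k 0 < v1 then
      PySem.Dict.insert d1copy k (v1 - PySem.Dict.getD d2 k 0)
    else
      PySem.Dict.erase d1copy k

def removeFrom (d1 : List (String × Int)) (d2 : List (String × Int)) : List (String × Int) :=
  ((PySem.Dict.keys (⟨d2⟩ : PySem.Dict String Int)).foldl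
    (removeFromStep (⟨d2⟩ : PySem.Dict String Int)) (⟨d1⟩ : PySem.Dict String Int)).items

-- ===== PORT B =====
-- one comprehension entry: '{k: v - d2.get(k, 0) for k, v in d1.items() if k not in d2 or d2[k] < v}'
def removeFromEntry (d2 : PySem.Dict String Int) (kv : String × Int) : Option (String × Int) :=
  if (PySem.Dict.get? d2 kv.1).isNone || decide (PySem.Dict.getD d2 kv.1 0 < kv.2) then
    some (kv.1, kv.2 - PySem.Dict.getD d2 kv.1 0)
  else
    none

def removeFrom_alt (d1 : List (String × Int)) (d2 : List (String × Int)) : List (String × Int) :=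
  d1.filterMap (removeFromEntry (⟨d2⟩ : PySem.Dict String Int))

-- ===== PRECONDITION & SPEC =====
-- Pre_ requires distinct keys in each association list: this is the representation invariant of a
-- Python dict (a dict cannot hold duplicate keys), so it excludes no input the Python A ever receives.
def Pre_removeFrom (d1 : List (String × Int)) (d2 : List (String × Int)) : Prop :=
  (d1.map Prod.fst).Nodup ∧ (d2.map Prod.fst).Nodup
instance (d1 : List (String × Int)) (d2 : List (String × Int)) : Decidable (Pre_removeFrom d1 d2) := by unfold Pre_removeFrom; infer_instance

def pvWitness_removeFrom : (List (String × Int)) × (List (String × Int)) :=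
  ([("a", 3), ("b", 1)], [("a", 1), ("c", 2)])

def Spec_removeFrom (d1 : List (String × Int)) (d2 : List (String × Int)) (out : List (String × Int)) : Prop := out = removeFrom_alt d1 d2
instance (d1 : List (String × Int)) (d2 : List (String × Int)) (out : List (String × Int)) : Decidable (Spec_removeFrom d1 d2 out) := by unfold Spec_removeFrom; infer_instance

-- ===== CLAIM (what is proved, stated in full; the proofs are below) =====
def Claim_equal_removeFrom : Prop := ∀ (d1 : List (String × Int)) (d2 : List (String × Int)), Dom_removeFrom d1 d2 → Pre_removeFrom d1 d2 → Spec_removeFrom d1 d2 (removeFrom d1 d2)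

-- ===== LEMMAS AND PROOFS =====

-- per-key entrywise action of A's loop body for key k (v2 = d2[k] with default 0)
def sFun (v2 : Int) (k : String) (kv : String × Int) : Option (String × Int) :=
  if kv.1 == k then (if v2 < kv.2 then some (kv.1, kv.2 - v2) else none) else some kv

-- entrywise action of A's whole loop over the key list ks
def fFun (d2 : PySem.Dict String Int) (ks : List String) (kv : String × Int) : Option (String × Int) :=
  if kv.1 ∈ ks then
    (if PySem.Dict.getD d2 kv.1 0 < kv.2 then some (kv.1, kv.2 - PySem.Dict.getD d2 kv.1 0) else none)
  else some kv

lemma filterMap_eq_filter_of (l : List (String × Int)) (f : String × Int → Option (String × Int))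
    (p : String × Int → Bool) (h : ∀ x ∈ l, f x = if p x then some x else none) :
    l.filterMap f = l.filter p := by
  induction l with
  | nil => simp
  | cons a l ih =>
    have ha := h a (by simp)
    have ih' := ih (fun x hx => h x (by simp [hx]))
    by_cases hp : p a = true <;>
      simp [ha, hp, ih']

lemma keys_sublist_of_filterMap (f : String × Int → Option (String × Int))
    (hf : ∀ kv r, f kv = some r → r.1 = kv.1) (l : List (String × Int)) :
    ((l.filterMap f).map Prod.fst).Sublist (l.map Prod.fst) := by
  induction l with
  | nil => simp
  | cons a l ih =>
    cases h : f a with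
    | none => simpa [List.filterMap_cons, h] using ih.cons _
    | some r =>
      have : r.1 = a.1 := hf a r h
      simpa [List.filterMap_cons, h, this] using ih.cons₂ a.1

lemma sFun_key (v2 : Int) (k : String) (kv r : String × Int) (h : sFun v2 k kv = some r) :
    r.1 = kv.1 := by
  unfold sFun at h
  by_cases hk : (kv.1 == k) = true
  · rw [if_pos hk] at h
    by_cases hlt : v2 < kv.2
    · rw [if_pos hlt] at h; cases h; rfl
    · rw [if_neg hlt] at h; cases h
  · rw [if_neg hk] at h; cases h; rfl

lemma step_eq_filterMap (d2 d : PySem.Dict String Int) (k : String)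
    (hd : (d.items.map Prod.fst).Nodup) :
    (removeFromStep d2 d k).items = d.items.filterMap (sFun (PySem.Dict.getD d2 k 0) k) := by
  unfold removeFromStep
  cases hget : PySem.Dict.get? d k with
  | none =>
    -- no entry of d has key k: sFun is the identity on every entry
    have hfind : List.find? (fun p => p.1 == k) d.items = none := by
      simpa [PySem.Dict.get?, Option.map_eq_none_iff] using hget
    have hnone : ∀ kv ∈ d.items, (kv.1 == k) = false := by
      intro kv hkv
      have := List.find?_eq_none.mp hfind kv hkv
      simpa using this
    have : ∀ kv ∈ d.items, sFun (PySem.Dict.getD d2 k 0) k kv = some kv := by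
      intro kv hkv; simp [sFun, hnone kv hkv]
    simp [(List.filterMap_eq_map_iff_forall_eq_some.mpr (fun kv hkv => by
      simpa using this kv hkv) : d.items.filterMap _ = d.items.map id)]
  | some v1 =>
    obtain ⟨e, hfind⟩ : ∃ e, List.find? (fun p => p.1 == k) d.items = some e ∧ e.2 = v1 := by
      simp only [PySem.Dict.get?, Option.map_eq_some_iff] at hget
      obtain ⟨e, he1, he2⟩ := hget; exact ⟨e, he1, he2⟩
    obtain ⟨hfind, hev⟩ := hfind
    have hek : e.1 = k := by
      have := List.find?_some hfind; simpa [beq_iff_eq] using this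
    have hmem : e ∈ d.items := List.mem_of_find?_eq_some hfind
    -- nodup keys: every entry of d with key k has value v1
    have hpw : d.items.Pairwise (fun a b => a.1 ≠ b.1) := by
      have := hd
      rw [List.Nodup, List.pairwise_map] at this
      exact this
    have huniq : ∀ kv ∈ d.items, kv.1 = k → kv.2 = v1 := by
      intro kv hkv hkvk
      have hkeys : kv.1 = e.1 := by rw [hkvk, hek]
      have : kv = e := by
        by_contra hne
        exact List.Pairwise.forall (fun a b hab => fun h' => hab h'.symm) hpw hkv hmem hne hkeys
      rw [this, hev]
    have hcontains : d.contains k = true := by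
      simp only [PySem.Dict.contains, List.any_eq_true]
      exact ⟨e, hmem, by simp [hek]⟩
    by_cases hlt : PySem.Dict.getD d2 k 0 < v1
    · -- insert branch: filterMap is a total map here
      simp only [hlt, if_pos, PySem.Dict.insert, hcontains]
      symm
      apply List.filterMap_eq_map_iff_forall_eq_some.mpr
      intro kv hkv
      by_cases hk : kv.1 = k
      · have hv : kv.2 = v1 := huniq kv hkv hk
        simp [sFun, hk, hv, hlt]
      · simp [sFun, hk]
    · -- erase branch: filterMap is a filter here
      simp only [hlt, if_false, PySem.Dict.erase]
      symm
      apply filterMap_eq_filter_of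
      intro kv hkv
      by_cases hk : kv.1 = k
      · have hv : kv.2 = v1 := huniq kv hkv hk
        simp [sFun, hk, hv, hlt]
      · simp [sFun, hk]

lemma bind_sFun (d2 : PySem.Dict String Int) (k : String) (ks : List String) (hk : k ∉ ks)
    (kv : String × Int) :
    (sFun (PySem.Dict.getD d2 k 0) k kv).bind (fFun d2 ks) = fFun d2 (k :: ks) kv := by
  unfold sFun fFun
  by_cases h : kv.1 = k
  · subst h
    by_cases hlt : PySem.Dict.getD d2 kv.1 0 < kv.2 <;> simp [hlt, hk]
  · simp [h]

lemma foldl_eq_filterMap (d2 : PySem.Dict String Int) :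
    ∀ (ks : List String), ks.Nodup → ∀ (d : PySem.Dict String Int),
      (d.items.map Prod.fst).Nodup →
      (ks.foldl (removeFromStep d2) d).items = d.items.filterMap (fFun d2 ks) := by
  intro ks
  induction ks with
  | nil =>
    intro _ d _
    simp [fFun]
  | cons k ks ih =>
    intro hks d hd
    have hk : k ∉ ks := (List.nodup_cons.mp hks).1
    have hks' : ks.Nodup := (List.nodup_cons.mp hks).2
    have hstep := step_eq_filterMap d2 d k hd
    have hnodup' : ((removeFromStep d2 d k).items.map Prod.fst).Nodup := by
      rw [hstep]
      exact (keys_sublist_of_filterMap _ (sFun_key _ _) d.items).nodup hd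
    calc ((k :: ks).foldl (removeFromStep d2) d).items
        = (ks.foldl (removeFromStep d2) (removeFromStep d2 d k)).items := by
          simp [List.foldl_cons]
      _ = (removeFromStep d2 d k).items.filterMap (fFun d2 ks) := ih hks' _ hnodup'
      _ = (d.items.filterMap (sFun (PySem.Dict.getD d2 k 0) k)).filterMap (fFun d2 ks) := by
          rw [hstep]
      _ = d.items.filterMap (fun kv => (sFun (PySem.Dict.getD d2 k 0) k kv).bind (fFun d2 ks)) :=
          List.filterMap_filterMap
      _ = d.items.filterMap (fFun d2 (k :: ks)) := by
          exact List.filterMap_congr (fun kv _ => bind_sFun d2 k ks hk kv)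

lemma fFun_keys (d2 : PySem.Dict String Int) (kv : String × Int) :
    fFun d2 (PySem.Dict.keys d2) kv = removeFromEntry d2 kv := by
  unfold fFun removeFromEntry
  by_cases h : kv.1 ∈ PySem.Dict.keys d2
  · have hsome : (PySem.Dict.get? d2 kv.1).isSome := by
      simp only [PySem.Dict.keys, List.mem_map] at h
      obtain ⟨e, he, hek⟩ := h
      simp only [PySem.Dict.get?, Option.isSome_map]
      rw [List.find?_isSome]
      exact ⟨e, he, by simp [hek]⟩
    have hnone : (PySem.Dict.get? d2 kv.1).isNone = false := by
      simp [Option.isNone_eq_false_iff, hsome]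
    simp [h, hnone]
  · have hget : PySem.Dict.get? d2 kv.1 = none := by
      simp only [PySem.Dict.get?, Option.map_eq_none_iff]
      rw [List.find?_eq_none]
      intro e he
      simp only [PySem.Dict.keys, List.mem_map] at h
      simp only [beq_iff_eq]
      intro hek
      exact h ⟨e, he, hek⟩
    simp [h, hget, PySem.Dict.getD]

-- ===== VERDICT (by name: the statement is the Claim_ definition above) =====
theorem removeFrom_spec : Claim_equal_removeFrom := by
  intro d1 d2 _ hpre
  unfold Spec_removeFrom removeFrom removeFrom_alt
  have hkeys : (PySem.Dict.keys (⟨d2⟩ : PySem.Dict String Int)).Nodup := by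
    simpa [PySem.Dict.keys] using hpre.2
  rw [foldl_eq_filterMap (⟨d2⟩ : PySem.Dict String Int) _ hkeys ⟨d1⟩ (by simpa using hpre.1)]
  exact List.filterMap_congr (fun kv _ => fFun_keys _ kv)
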